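-- pv_equiv track=rewrite | github.com/minhduc5a15/utc_code | Python/4so.py | solve
-- ===== SOURCE A (Python) =====
-- def solve(nums) -> int:
--         count = {}
--         result = 0
--         n = len(nums)
--         for i in range(n - 2, 0, -1):
--             for j in range(i + 1, n):
--                 num = nums[i] + nums[j]
--                 count[num] = count.get(num, 0) + 1
--             for j in range(i - 2, -1, -1):
--                 num = nums[j] + nums[i - 1]
--                 result += count.get(num, 0)
--         return result
-- ===== SOURCE B (Python) =====
-- def solve(nums) -> int:
--     # Group every index pair (i, j), i < j, by its pair-sum; then count, per
--     # group, the ordered pairs (P, Q) with P.high < Q.low via one sort and a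
--     # tagged-event sweep (tag 0 = a 'low' event, tag 1 = a 'high' event; at
--     # equal value lows come first, so only strictly smaller highs are counted).
--     n = len(nums)
--     groups = {}
--     for j in range(n):
--         for i in range(j):
--             groups.setdefault(nums[i] + nums[j], []).append((i, j))
--     total = 0
--     for pairs in groups.values():
--         events = sorted([(p[0], 0) for p in pairs] + [(p[1], 1) for p in pairs])
--         seen = 0
--         for (v, t) in events:
--             if t == 1:
--                 seen += 1
--             else:
--                 total += seen
--     return total
-- ===== Notes on version B (the rewrite author's own statement) =====
-- stated objective: alternative
-- what changed: Replaces A's backward index sweep that maintains a running dict of right-pair-sum counts with a two-phase algorithm: one pass groups all index pairs (i,j), i<j, by pair-sum into a dict of lists, then each group is counted independently by sorting tagged (value,tag) events and sweeping once, counting for each low-index event the strictly smaller high-index events.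
import Mathlib
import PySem

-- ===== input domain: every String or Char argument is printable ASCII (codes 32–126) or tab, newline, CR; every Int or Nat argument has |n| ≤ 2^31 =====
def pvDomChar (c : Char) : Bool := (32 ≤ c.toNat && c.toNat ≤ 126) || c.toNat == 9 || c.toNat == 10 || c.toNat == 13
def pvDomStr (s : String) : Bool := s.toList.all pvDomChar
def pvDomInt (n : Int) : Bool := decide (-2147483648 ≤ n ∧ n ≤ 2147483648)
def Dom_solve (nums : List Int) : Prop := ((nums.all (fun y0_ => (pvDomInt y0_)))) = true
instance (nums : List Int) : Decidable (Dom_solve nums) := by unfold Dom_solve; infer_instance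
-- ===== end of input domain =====

-- B re-implements A by grouping index pairs by pair-sum and counting each group with a
-- sort + tagged-event sweep; an alternative algorithm of similar cost (not claimed faster).

-- ===== PORT A =====
def solve (nums : List Int) : Int :=
  let n : Int := nums.length
  ((PySem.List.pyRange (n - 2) 0 (-1)).foldl (fun (st : PySem.Dict Int Int × Int) i =>
    let cnt := (PySem.List.pyRange (i + 1) n 1).foldl (fun (cnt : PySem.Dict Int Int) j =>
      let num := PySem.List.pyGetD nums i 0 + PySem.List.pyGetD nums j 0
      cnt.insert num (cnt.getD num 0 + 1)) st.1
    let res := (PySem.List.pyRange (i - 2) (-1) (-1)).foldl (fun (res : Int) j =>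
      let num := PySem.List.pyGetD nums j 0 + PySem.List.pyGetD nums (i - 1) 0
      res + cnt.getD num 0) st.2
    (cnt, res)) (PySem.Dict.empty, 0)).2

-- ===== PORT B =====
def solve_alt (nums : List Int) : Int :=
  let n : Int := nums.length
  let groups : PySem.Dict Int (List (Int × Int)) :=
    (PySem.List.pyRange 0 n 1).foldl (fun g j =>
      (PySem.List.pyRange 0 j 1).foldl (fun g i =>
        let s := PySem.List.pyGetD nums i 0 + PySem.List.pyGetD nums j 0
        -- groups.setdefault(s, []).append((i, j)): append (i, j) to the list stored at s
        g.modify s [] (· ++ [(i, j)])) g) PySem.Dict.empty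
  groups.values.foldl (fun total pairs =>
    let events := PySem.List.sorted2
      (pairs.map (fun p => (p.1, (0 : Int))) ++ pairs.map (fun p => (p.2, (1 : Int))))
      (·.1) (·.2)
    (events.foldl (fun (st : Int × Int) e =>
      if e.2 == 1 then (st.1 + 1, st.2) else (st.1, st.2 + st.1)) ((0 : Int), total)).2) 0

-- ===== PRECONDITION & SPEC =====
def Spec_solve (nums : List Int) (out : Int) : Prop := out = solve_alt nums
instance (nums : List Int) (out : Int) : Decidable (Spec_solve nums out) := by unfold Spec_solve; infer_instance

-- ===== CLAIM (what is proved, stated in full; the proofs are below) =====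
def Claim_equal_solve : Prop := ∀ (nums : List Int), Dom_solve nums → Spec_solve nums (solve nums)

-- ===== LEMMAS AND PROOFS =====

-- pair sum of an index pair
def pvS (nums : List Int) (p : Int × Int) : Int :=
  PySem.List.pyGetD nums p.1 0 + PySem.List.pyGetD nums p.2 0

-- all index pairs (i, j), 0 ≤ i < j < n, grouped by j (B's build order)
def pvPL (nums : List Int) : List (Int × Int) :=
  (PySem.List.pyRange 0 (nums.length : Int) 1).flatMap
    (fun j => (PySem.List.pyRange 0 j 1).map (fun i => (i, j)))

-- pairs (c, d), i ≤ c < d < n, grouped by c (the pairs A's dict has counted so far)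
def pvRestA (nums : List Int) (i : Int) : List (Int × Int) :=
  (PySem.List.pyRange i (nums.length : Int) 1).flatMap
    (fun c => (PySem.List.pyRange (c + 1) (nums.length : Int) 1).map (fun d => (c, d)))

-- number of right pairs (c, d), i ≤ c, with pair sum s
def pvR (nums : List Int) (i s : Int) : Nat :=
  ((pvRestA nums i).map (pvS nums)).count s

-- contribution of the left pairs (a, b) with a fixed b
def pvGB (nums : List Int) (b : Int) : Int :=
  ((PySem.List.pyRange 0 b 1).map (fun a => (pvR nums (b + 1) (pvS nums (a, b)) : Int))).sum

-- the matching predicate both programs count: q is a right pair for left pair p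
def pvM (nums : List Int) (p q : Int × Int) : Bool :=
  decide (pvS nums q = pvS nums p) && decide (p.2 < q.1)

-- the summand A computes: #right pairs q matching the left pair p
def pvH (nums : List Int) (p : Int × Int) : Int :=
  ((pvPL nums).countP (pvM nums p) : Int)

-- the summand B computes: #left pairs p matching the right pair q
def pvH' (nums : List Int) (q : Int × Int) : Int :=
  ((pvPL nums).countP (fun p => pvM nums p q) : Int)

-- the common specification of both programs
def pvSpec (nums : List Int) : Int := ((pvPL nums).map (pvH nums)).sum

-- ---- generic list lemmas ----

theorem pv_foldl_flatMap {α β σ : Type} (l : List α) (f : α → List β)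
    (g : σ → β → σ) (init : σ) :
    (l.flatMap f).foldl g init = l.foldl (fun acc x => (f x).foldl g acc) init := by
  induction l generalizing init with
  | nil => rfl
  | cons a l ih => simp [List.flatMap_cons, List.foldl_append, ih]

theorem pv_sum_flatMap {α β : Type} (l : List α) (f : α → List β) (h : β → Int) :
    ((l.flatMap f).map h).sum = (l.map (fun x => ((f x).map h).sum)).sum := by
  induction l with
  | nil => rfl
  | cons a l ih => simp [List.flatMap_cons, ih]

theorem pv_sum_sum_swap {α β : Type} (l : List α) (m : List β) (f : α → β → Int) :
    (l.map (fun x => (m.map (f x)).sum)).sum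
      = (m.map (fun y => (l.map (fun x => f x y)).sum)).sum := by
  induction l with
  | nil => simp
  | cons a l ih =>
      simp only [List.map_cons, List.sum_cons, ih]
      rw [PySem.List.sum_map_add_int m (fun y => f a y) (fun y => (List.map (fun x => f x y) l).sum)]

theorem pv_sum_filter_or {α : Type} (xs : List α) (p q : α → Bool) (h : α → Int)
    (hd : ∀ x, ¬(p x = true ∧ q x = true)) :
    ((xs.filter (fun x => p x || q x)).map h).sum
      = ((xs.filter p).map h).sum + ((xs.filter q).map h).sum := by
  induction xs with
  | nil => simp
  | cons x xs ih =>
      by_cases hp : p x = true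
      · have hq : q x = false := by
          rcases Bool.eq_false_or_eq_true (q x) with h' | h'
          · exact absurd ⟨hp, h'⟩ (hd x)
          · exact h'
        simp [hp, hq, ih]; ring
      · have hp' : p x = false := by simpa using hp
        by_cases hq : q x = true
        · simp [hp', hq, ih]; ring
        · have hq' : q x = false := by simpa using hq
          simp [hp', hq', ih]

theorem pv_sum_fibers {α κ : Type} [DecidableEq κ] (xs : List α) (f : α → κ)
    (h : α → Int) : ∀ (ks : List κ), ks.Nodup →
    (ks.map (fun k => ((xs.filter (fun x => decide (f x = k))).map h).sum)).sum
      = ((xs.filter (fun x => decide (f x ∈ ks))).map h).sum := by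
  intro ks
  induction ks with
  | nil => simp
  | cons k ks ih =>
      intro hnd
      rcases List.nodup_cons.mp hnd with ⟨hk, hnd'⟩
      have hsplit := pv_sum_filter_or xs (fun x => decide (f x = k))
        (fun x => decide (f x ∈ ks)) h (by
          intro x ⟨h1, h2⟩
          simp only [decide_eq_true_eq] at h1 h2
          exact hk (h1 ▸ h2))
      simp only [List.map_cons, List.sum_cons, ih hnd']
      rw [show (fun x => decide (f x ∈ k :: ks)) = (fun x => decide (f x = k) || decide (f x ∈ ks)) by
            funext x; simp [List.mem_cons], hsplit]

-- ---- sortedness of sorted2 ----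

def pvLexLe (a b : Int × Int) : Prop := a.1 < b.1 ∨ (a.1 = b.1 ∧ a.2 ≤ b.2)

def pvBef (a b : Int × Int) : Bool :=
  decide (a.1 < b.1) || (!decide (b.1 < a.1) && decide (a.2 < b.2))

theorem pv_insertBy_pairwise (x : Int × Int) : ∀ (l : List (Int × Int)),
    l.Pairwise (fun a b => pvBef b a = false) →
    (PySem.List.insertBy pvBef x l).Pairwise (fun a b => pvBef b a = false) := by
  intro l
  induction l with
  | nil =>
      intro _
      simp [PySem.List.insertBy]
  | cons y ys ih =>
      intro hpw
      rcases List.pairwise_cons.mp hpw with ⟨hy, hys⟩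
      by_cases hb : pvBef x y = true
      · rw [show PySem.List.insertBy pvBef x (y :: ys) = x :: y :: ys by
          simp [PySem.List.insertBy, hb]]
        refine List.pairwise_cons.mpr ⟨?_, hpw⟩
        intro z hz
        rcases List.mem_cons.mp hz with rfl | hz'
        · simp only [pvBef] at hb ⊢
          rcases Bool.or_eq_true_iff.mp hb with h1 | h1 <;> simp_all <;> omega
        · have h1 : pvBef z y = false := hy z hz'
          simp only [pvBef] at hb h1 ⊢
          rcases Bool.or_eq_true_iff.mp hb with h2 | h2 <;> simp_all <;> omega
      · have hb' : pvBef x y = false := by simpa using hb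
        rw [show PySem.List.insertBy pvBef x (y :: ys) = y :: PySem.List.insertBy pvBef x ys by
          simp [PySem.List.insertBy, hb']]
        refine List.pairwise_cons.mpr ⟨?_, ih hys⟩
        intro z hz
        rcases (PySem.List.mem_insertBy pvBef x z ys).mp hz with rfl | hz'
        · exact hb'
        · exact hy z hz'

theorem pv_sorted2_pairwise (xs : List (Int × Int)) :
    (PySem.List.sorted2 xs (·.1) (·.2)).Pairwise pvLexLe := by
  have key : ∀ (acc : List (Int × Int)), acc.Pairwise (fun a b => pvBef b a = false) →
      (xs.foldl (fun acc x => PySem.List.insertBy pvBef x acc) acc).Pairwise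
        (fun a b => pvBef b a = false) := by
    induction xs with
    | nil => intro acc h; exact h
    | cons x xs ih => intro acc h; exact ih _ (pv_insertBy_pairwise x acc h)
  have heq : PySem.List.sorted2 xs (·.1) (·.2)
      = xs.foldl (fun acc x => PySem.List.insertBy pvBef x acc) [] := by
    simp only [PySem.List.sorted2]
    unfold pvBef
    rfl
  rw [heq]
  exact (key [] (by simp)).imp (by
    intro a b h
    simp only [pvBef, Bool.or_eq_false_iff, Bool.and_eq_false_iff] at h
    unfold pvLexLe
    rcases h with ⟨h1, h2⟩
    simp only [decide_eq_false_iff_not, Bool.not_eq_false', decide_eq_true_eq] at h1 h2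
    rcases h2 with h2 | h2
    · left; exact h2
    · omega)

-- ---- the event sweep (B's inner loop) on a lex-sorted list ----

theorem pv_sweep : ∀ (E : List (Int × Int)), E.Pairwise pvLexLe →
    (∀ e ∈ E, e.2 = 0 ∨ e.2 = 1) → ∀ (s0 t : Int),
    (E.foldl (fun (st : Int × Int) e =>
        if e.2 == 1 then (st.1 + 1, st.2) else (st.1, st.2 + st.1)) (s0, t))
      = (s0 + (E.countP (fun e => e.2 == 1) : Int),
         t + ((E.filter (fun e => !(e.2 == 1))).map
                (fun e => s0 + (E.countP (fun e' => e'.2 == 1 && decide (e'.1 < e.1)) : Int))).sum) := by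
  intro E
  induction E with
  | nil => intro _ _ s0 t; simp
  | cons e E ih =>
    intro hpw htags s0 t
    rcases List.pairwise_cons.mp hpw with ⟨hhead, hpw'⟩
    have htags' : ∀ x ∈ E, x.2 = 0 ∨ x.2 = 1 := fun x hx => htags x (List.mem_cons_of_mem _ hx)
    rcases htags e (List.mem_cons_self ..) with h0 | h1
    · -- e is a 'low' event: total += seen
      rw [List.foldl_cons]
      rw [show ((if e.2 == 1 then ((s0 : Int) + 1, t) else (s0, t + s0)) : Int × Int) = (s0, t + s0) by
        simp [h0]]
      rw [ih hpw' htags' s0 (t + s0)]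
      simp only [Prod.mk.injEq]
      have hzero : E.countP (fun e' => e'.2 == 1 && decide (e'.1 < e.1)) = 0 := by
        rw [List.countP_eq_zero]
        intro x hx
        have := hhead x hx
        unfold pvLexLe at this
        simp only [Bool.and_eq_true, decide_eq_true_eq, beq_iff_eq, not_and]
        intro _; omega
      have hfe : (e :: E).filter (fun e' => !(e'.2 == 1)) = e :: E.filter (fun e' => !(e'.2 == 1)) := by
        simp [List.filter_cons, h0]
      have hcnt_head : (e :: E).countP (fun e' => e'.2 == 1 && decide (e'.1 < e.1)) = 0 := by
        rw [List.countP_cons, hzero]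
        simp [h0]
      refine ⟨by rw [List.countP_cons]; simp [h0], ?_⟩
      rw [hfe, List.map_cons, List.sum_cons, hcnt_head]
      have hc : ∀ x ∈ E.filter (fun e' => !(e'.2 == 1)),
          s0 + ((e :: E).countP (fun e' => e'.2 == 1 && decide (e'.1 < x.1)) : Int)
            = s0 + (E.countP (fun e' => e'.2 == 1 && decide (e'.1 < x.1)) : Int) := by
        intro x _
        rw [List.countP_cons]
        simp [h0]
      rw [List.map_congr_left hc]
      push_cast
      ring
    · -- e is a 'high' event: seen += 1
      rw [List.foldl_cons]
      rw [show ((if e.2 == 1 then ((s0 : Int) + 1, t) else (s0, t + s0)) : Int × Int) = (s0 + 1, t) by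
        simp [h1]]
      rw [ih hpw' htags' (s0 + 1) t]
      simp only [Prod.mk.injEq]
      have hfe : (e :: E).filter (fun e' => !(e'.2 == 1)) = E.filter (fun e' => !(e'.2 == 1)) := by
        simp [List.filter_cons, h1]
      constructor
      · rw [List.countP_cons]
        simp [h1]
        push_cast
        ring
      · rw [hfe]
        have hc : ∀ x ∈ E.filter (fun e' => !(e'.2 == 1)),
            s0 + 1 + (E.countP (fun e' => e'.2 == 1 && decide (e'.1 < x.1)) : Int)
              = s0 + ((e :: E).countP (fun e' => e'.2 == 1 && decide (e'.1 < x.1)) : Int) := by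
          intro x hx
          have hxE : x ∈ E := List.mem_of_mem_filter hx
          have hx0 : x.2 = 0 := by
            have := List.of_mem_filter hx
            rcases htags' x hxE with h | h
            · exact h
            · simp [h] at this
          have hlt : e.1 < x.1 := by
            have := hhead x hxE
            unfold pvLexLe at this
            rcases this with h | h
            · exact h
            · omega
          rw [show (e :: E).countP (fun e' => e'.2 == 1 && decide (e'.1 < x.1))
               = E.countP (fun e' => e'.2 == 1 && decide (e'.1 < x.1)) + 1 by
            rw [List.countP_cons]; simp [h1, hlt]]
          push_cast
          ring
        rw [List.map_congr_left hc]


-- ---- A's loop ----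

-- proof-side names for the loop bodies of port A (definitionally equal to solve's lambdas)
def pvInnerCnt (nums : List Int) (cnt0 : PySem.Dict Int Int) (i : Int) : PySem.Dict Int Int :=
  (PySem.List.pyRange (i + 1) (nums.length : Int) 1).foldl (fun (cnt : PySem.Dict Int Int) j =>
    let num := PySem.List.pyGetD nums i 0 + PySem.List.pyGetD nums j 0
    cnt.insert num (cnt.getD num 0 + 1)) cnt0

def pvInnerRes (nums : List Int) (cnt : PySem.Dict Int Int) (res0 : Int) (i : Int) : Int :=
  (PySem.List.pyRange (i - 2) (-1) (-1)).foldl (fun (res : Int) j =>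
    let num := PySem.List.pyGetD nums j 0 + PySem.List.pyGetD nums (i - 1) 0
    res + cnt.getD num 0) res0

def pvStepA (nums : List Int) (st : PySem.Dict Int Int × Int) (i : Int) :
    PySem.Dict Int Int × Int :=
  let cnt := pvInnerCnt nums st.1 i
  let res := pvInnerRes nums cnt st.2 i
  (cnt, res)

theorem pv_solve_eq (nums : List Int) :
    solve nums = ((PySem.List.pyRange ((nums.length : Int) - 2) 0 (-1)).foldl
      (pvStepA nums) (PySem.Dict.empty, 0)).2 := rfl

theorem pv_restA_nil (nums : List Int) (i : Int) (h : (nums.length : Int) - 1 ≤ i) :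
    pvRestA nums i = [] := by
  unfold pvRestA
  rw [List.flatMap_eq_nil_iff]
  intro c hc
  rw [PySem.List.mem_pyRange_one] at hc
  rw [PySem.List.pyRange_one_eq_nil (by omega)]
  rfl

theorem pv_restA_cons (nums : List Int) (i : Int) (h : i < (nums.length : Int)) :
    pvRestA nums i
      = ((PySem.List.pyRange (i + 1) (nums.length : Int) 1).map (fun d => (i, d)))
        ++ pvRestA nums (i + 1) := by
  unfold pvRestA
  rw [PySem.List.pyRange_one_cons h, List.flatMap_cons]

theorem pv_R_step (nums : List Int) (i s : Int) (h : i < (nums.length : Int)) :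
    pvR nums i s
      = ((PySem.List.pyRange (i + 1) (nums.length : Int) 1).map
          (fun j => PySem.List.pyGetD nums i 0 + PySem.List.pyGetD nums j 0)).count s
        + pvR nums (i + 1) s := by
  unfold pvR
  rw [pv_restA_cons nums i h, List.map_append, List.count_append]
  congr 2
  rw [List.map_map]
  rfl

theorem pv_innerCnt_getD (nums : List Int) (cnt0 : PySem.Dict Int Int) (i s : Int) :
    (pvInnerCnt nums cnt0 i).getD s 0
      = cnt0.getD s 0 + (((PySem.List.pyRange (i + 1) (nums.length : Int) 1).map
          (fun j => PySem.List.pyGetD nums i 0 + PySem.List.pyGetD nums j 0)).count s : Int) := by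
  unfold pvInnerCnt
  rw [← List.foldl_map (f := fun j => PySem.List.pyGetD nums i 0 + PySem.List.pyGetD nums j 0)
    (g := fun (d : PySem.Dict Int Int) x => d.insert x (d.getD x 0 + 1))]
  exact PySem.Dict.getD_foldl_insert_add_one _ cnt0 s

theorem pv_innerRes_eq (nums : List Int) (cnt : PySem.Dict Int Int) (res0 i : Int) :
    pvInnerRes nums cnt res0 i
      = res0 + ((PySem.List.pyRange 0 (i - 1) 1).map
          (fun j => cnt.getD (PySem.List.pyGetD nums j 0 + PySem.List.pyGetD nums (i - 1) 0) 0)).sum := by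
  unfold pvInnerRes
  rw [PySem.List.foldl_add _
    (fun j => cnt.getD (PySem.List.pyGetD nums j 0 + PySem.List.pyGetD nums (i - 1) 0) 0) res0]
  congr 1
  rw [PySem.List.pyRange_neg_one_eq_reverse, show (-1 : Int) + 1 = 0 from rfl,
    show i - 2 + 1 = i - 1 by ring, List.map_reverse, List.sum_reverse]

theorem pv_step_cnt (nums : List Int) (cnt0 : PySem.Dict Int Int) (i : Int)
    (h : i < (nums.length : Int))
    (hcnt : ∀ s, cnt0.getD s 0 = (pvR nums (i + 1) s : Int)) (s : Int) :
    (pvInnerCnt nums cnt0 i).getD s 0 = (pvR nums i s : Int) := by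
  rw [pv_innerCnt_getD, hcnt, pv_R_step nums i s h]
  push_cast
  ring

theorem pv_step_res (nums : List Int) (cnt : PySem.Dict Int Int) (res0 i : Int)
    (hcnt : ∀ s, cnt.getD s 0 = (pvR nums i s : Int)) :
    pvInnerRes nums cnt res0 i = res0 + pvGB nums (i - 1) := by
  rw [pv_innerRes_eq]
  congr 1
  unfold pvGB
  refine congrArg List.sum (List.map_congr_left ?_)
  intro a _
  rw [hcnt]
  have : i - 1 + 1 = i := by ring
  rw [this]
  rfl

theorem pv_loopA (nums : List Int) : ∀ (k : Nat) (cnt : PySem.Dict Int Int) (res : Int),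
    (k : Int) ≤ (nums.length : Int) - 2 →
    (∀ s, cnt.getD s 0 = (pvR nums ((k : Int) + 1) s : Int)) →
    res = ((PySem.List.pyRange (k : Int) ((nums.length : Int) - 2) 1).map (pvGB nums)).sum →
    ((PySem.List.pyRange (k : Int) 0 (-1)).foldl (pvStepA nums) (cnt, res)).2
      = ((PySem.List.pyRange 0 ((nums.length : Int) - 2) 1).map (pvGB nums)).sum := by
  intro k
  induction k with
  | zero =>
      intro cnt res hk hcnt hres
      rw [PySem.List.pyRange_neg_one_eq_nil (by norm_num)]
      simpa using hres
  | succ k ih =>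
      intro cnt res hk hcnt hres
      have hcast : ((k + 1 : Nat) : Int) = (k : Int) + 1 := by push_cast; ring
      rw [hcast] at hk hcnt hres ⊢
      have hin : (k : Int) + 1 < (nums.length : Int) := by omega
      rw [PySem.List.pyRange_neg_one_cons (by omega : (0 : Int) < (k : Int) + 1), List.foldl_cons,
        show (k : Int) + 1 - 1 = (k : Int) by ring]
      have hcnt2 : ∀ s, cnt.getD s 0 = (pvR nums (((k : Int) + 1) + 1) s : Int) := hcnt
      have hc' : ∀ s, (pvInnerCnt nums cnt ((k : Int) + 1)).getD s 0
          = (pvR nums ((k : Int) + 1) s : Int) :=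
        pv_step_cnt nums cnt ((k : Int) + 1) hin hcnt2
      have hstep : pvStepA nums (cnt, res) ((k : Int) + 1)
          = (pvInnerCnt nums cnt ((k : Int) + 1),
             pvInnerRes nums (pvInnerCnt nums cnt ((k : Int) + 1)) res ((k : Int) + 1)) := rfl
      rw [hstep]
      apply ih _ _ (by omega) hc'
      rw [pv_step_res nums _ res ((k : Int) + 1) hc', show (k : Int) + 1 - 1 = (k : Int) by ring]
      rw [PySem.List.pyRange_one_cons (by omega : (k : Int) < (nums.length : Int) - 2),
        List.map_cons, List.sum_cons, hres]
      ring

theorem pv_A_eq (nums : List Int) :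
    solve nums = ((PySem.List.pyRange 0 ((nums.length : Int) - 2) 1).map (pvGB nums)).sum := by
  rw [pv_solve_eq]
  by_cases h : (nums.length : Int) ≤ 2
  · rw [PySem.List.pyRange_neg_one_eq_nil (by omega), PySem.List.pyRange_one_eq_nil (by omega)]
    rfl
  · push_neg at h
    obtain ⟨k, hk⟩ : ∃ k : Nat, (k : Int) = (nums.length : Int) - 2 :=
      ⟨((nums.length : Int) - 2).toNat, Int.toNat_of_nonneg (by omega)⟩
    have H := pv_loopA nums k PySem.Dict.empty 0 (by omega)
      (by
        intro s
        rw [PySem.Dict.getD_empty]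
        have hnil : pvRestA nums ((k : Int) + 1) = [] := by
          apply pv_restA_nil
          omega
        unfold pvR
        rw [hnil]
        simp)
      (by
        rw [hk, PySem.List.pyRange_one_eq_nil (by omega)]
        rfl)
    rw [hk] at H
    exact H

-- ---- membership, nodup, permutation ----

theorem pv_mem_restA (nums : List Int) (i : Int) (q : Int × Int) :
    q ∈ pvRestA nums i ↔ i ≤ q.1 ∧ q.1 < q.2 ∧ q.2 < (nums.length : Int) := by
  unfold pvRestA
  simp only [List.mem_flatMap, List.mem_map, PySem.List.mem_pyRange_one]
  constructor
  · rintro ⟨c, ⟨hc1, hc2⟩, d, ⟨hd1, hd2⟩, rfl⟩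
    exact ⟨hc1, by omega, hd2⟩
  · rintro ⟨h1, h2, h3⟩
    exact ⟨q.1, ⟨h1, by omega⟩, q.2, ⟨by omega, h3⟩, rfl⟩

theorem pv_mem_PL (nums : List Int) (q : Int × Int) :
    q ∈ pvPL nums ↔ 0 ≤ q.1 ∧ q.1 < q.2 ∧ q.2 < (nums.length : Int) := by
  unfold pvPL
  simp only [List.mem_flatMap, List.mem_map, PySem.List.mem_pyRange_one]
  constructor
  · rintro ⟨j, ⟨hj1, hj2⟩, i, ⟨hi1, hi2⟩, rfl⟩
    exact ⟨hi1, hi2, hj2⟩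
  · rintro ⟨h1, h2, h3⟩
    exact ⟨q.2, ⟨by omega, h3⟩, q.1, ⟨h1, h2⟩, rfl⟩

theorem pv_nodup_PL (nums : List Int) : (pvPL nums).Nodup := by
  unfold pvPL
  rw [List.nodup_flatMap]
  refine ⟨fun j _ => ?_, ?_⟩
  · exact (PySem.List.nodup_pyRange_one _ _).map (fun a b h => by simpa using congrArg Prod.fst h)
  · exact (PySem.List.nodup_pyRange_one 0 (nums.length : Int)).imp (fun hne x hx1 hx2 => by
      rcases List.mem_map.mp hx1 with ⟨i1, _, rfl⟩
      rcases List.mem_map.mp hx2 with ⟨i2, _, heq⟩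
      exact hne (by simpa using (congrArg Prod.snd heq).symm))

theorem pv_nodup_restA (nums : List Int) (i0 : Int) : (pvRestA nums i0).Nodup := by
  unfold pvRestA
  rw [List.nodup_flatMap]
  refine ⟨fun c _ => ?_, ?_⟩
  · exact (PySem.List.nodup_pyRange_one _ _).map (fun a b h => by simpa using congrArg Prod.snd h)
  · exact (PySem.List.nodup_pyRange_one i0 (nums.length : Int)).imp (fun hne x hx1 hx2 => by
      rcases List.mem_map.mp hx1 with ⟨d1, _, rfl⟩
      rcases List.mem_map.mp hx2 with ⟨d2, _, heq⟩
      exact hne (by simpa using (congrArg Prod.fst heq).symm))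

theorem pv_perm_restA (nums : List Int) : (pvRestA nums 0).Perm (pvPL nums) :=
  (List.perm_ext_iff_of_nodup (pv_nodup_restA nums 0) (pv_nodup_PL nums)).mpr
    (fun q => by rw [pv_mem_restA, pv_mem_PL])

-- ---- counting right pairs over pvPL ----

theorem pv_count_restA (nums : List Int) (i s : Int) (h0 : 0 ≤ i) :
    pvR nums i s
      = (pvPL nums).countP (fun q => decide (pvS nums q = s) && decide (i ≤ q.1)) := by
  unfold pvR
  rw [List.count_eq_countP, List.countP_map]
  by_cases hle : i ≤ (nums.length : Int)
  · have hsplit : pvRestA nums 0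
        = ((PySem.List.pyRange 0 i 1).flatMap
            (fun c => (PySem.List.pyRange (c + 1) (nums.length : Int) 1).map (fun d => (c, d))))
          ++ pvRestA nums i := by
      unfold pvRestA
      rw [PySem.List.pyRange_one_append 0 i (nums.length : Int) h0 hle, List.flatMap_append]
    have h1 : ((pvRestA nums i).countP ((fun x => x == s) ∘ pvS nums))
        = (pvRestA nums i).countP (fun q => decide (pvS nums q = s) && decide (i ≤ q.1)) := by
      apply List.countP_congr
      intro q hq
      have := (pv_mem_restA nums i q).mp hq
      simp only [Function.comp, beq_iff_eq, Bool.and_eq_true, decide_eq_true_eq]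
      constructor
      · intro h; exact ⟨h, this.1⟩
      · intro h; exact h.1
    have h2 : ((PySem.List.pyRange 0 i 1).flatMap
          (fun c => (PySem.List.pyRange (c + 1) (nums.length : Int) 1).map (fun d => (c, d)))).countP
            (fun q => decide (pvS nums q = s) && decide (i ≤ q.1)) = 0 := by
      rw [List.countP_eq_zero]
      intro q hq
      have : q.1 < i := by
        rcases List.mem_flatMap.mp hq with ⟨c, hc, hq'⟩
        rcases List.mem_map.mp hq' with ⟨d, _, rfl⟩
        exact (PySem.List.mem_pyRange_one.mp hc).2
      simp only [Bool.and_eq_true, decide_eq_true_eq, not_and]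
      intro _
      omega
    rw [h1, ← (pv_perm_restA nums).countP_eq, hsplit, List.countP_append, h2, Nat.zero_add]
  · rw [pv_restA_nil nums i (by omega)]
    rw [List.countP_nil]
    symm
    rw [List.countP_eq_zero]
    intro q hq
    have := (pv_mem_PL nums q).mp hq
    simp only [Bool.and_eq_true, decide_eq_true_eq, not_and]
    intro _
    omega

theorem pv_GB_eq (nums : List Int) (b : Int) (hb : 0 ≤ b) :
    pvGB nums b = ((PySem.List.pyRange 0 b 1).map (fun a => pvH nums (a, b))).sum := by
  unfold pvGB pvH
  refine congrArg List.sum (List.map_congr_left ?_)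
  intro a _
  rw [pv_count_restA nums (b + 1) _ (by omega)]
  have : (fun q : Int × Int => decide (pvS nums q = pvS nums (a, b)) && decide (b + 1 ≤ q.1))
      = pvM nums (a, b) := by
    funext q
    unfold pvM
    congr 1
  rw [this]

theorem pv_H_zero (nums : List Int) (p : Int × Int) (hp : (nums.length : Int) - 2 ≤ p.2) :
    pvH nums p = 0 := by
  unfold pvH
  have : (pvPL nums).countP (pvM nums p) = 0 := by
    rw [List.countP_eq_zero]
    intro q hq
    have := (pv_mem_PL nums q).mp hq
    unfold pvM
    simp only [Bool.and_eq_true, decide_eq_true_eq, not_and]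
    intro _
    omega
  rw [this]
  rfl

theorem pv_A_spec (nums : List Int) : solve nums = pvSpec nums := by
  rw [pv_A_eq]
  unfold pvSpec
  rw [show pvPL nums = (PySem.List.pyRange 0 (nums.length : Int) 1).flatMap
      (fun j => (PySem.List.pyRange 0 j 1).map (fun i => (i, j))) from rfl, pv_sum_flatMap]
  by_cases h2 : 2 ≤ (nums.length : Int)
  · rw [PySem.List.pyRange_one_append 0 ((nums.length : Int) - 2) (nums.length : Int)
      (by omega) (by omega), List.map_append, List.sum_append]
    have htail : ((PySem.List.pyRange ((nums.length : Int) - 2) (nums.length : Int)).map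
        (fun j => (((PySem.List.pyRange 0 j 1).map (fun i => (i, j))).map (pvH nums)).sum)).sum
          = 0 := by
      rw [List.map_congr_left (g := fun _ => (0 : Int)) (fun j hj => ?_)]
      · simp
      · rw [PySem.List.mem_pyRange_one] at hj
        rw [List.map_congr_left (g := fun _ => (0 : Int)) (fun p hp => ?_)]
        · simp [Function.comp_def]
        · rcases List.mem_map.mp hp with ⟨i, _, rfl⟩
          exact pv_H_zero nums (i, j) (by simpa using hj.1)
    rw [htail, add_zero]
    refine congrArg List.sum (List.map_congr_left ?_)
    intro b hb
    rw [PySem.List.mem_pyRange_one] at hb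
    rw [pv_GB_eq nums b hb.1, List.map_map]
    rfl
  · rw [PySem.List.pyRange_one_eq_nil (show (nums.length : Int) - 2 ≤ 0 by omega)]
    simp only [List.map_nil, List.sum_nil]
    symm
    rw [List.map_congr_left (g := fun _ => (0 : Int)) (fun j hj => ?_)]
    · simp
    · rw [PySem.List.mem_pyRange_one] at hj
      rw [PySem.List.pyRange_one_eq_nil (by omega : j ≤ 0)]
      rfl


-- ---- B ----

-- proof-side name for B's grouping dict (definitionally equal to solve_alt's)
def pvBuild (nums : List Int) : PySem.Dict Int (List (Int × Int)) :=
  (PySem.List.pyRange 0 (nums.length : Int) 1).foldl (fun g j =>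
    (PySem.List.pyRange 0 j 1).foldl (fun g i =>
      let s := PySem.List.pyGetD nums i 0 + PySem.List.pyGetD nums j 0
      g.modify s [] (· ++ [(i, j)])) g) PySem.Dict.empty

-- what B's sweep computes on one group
def pvCg (g : List (Int × Int)) : Int :=
  (g.map (fun q => (g.countP (fun p => decide (p.2 < q.1)) : Int))).sum

theorem pv_alt_eq (nums : List Int) :
    solve_alt nums = (pvBuild nums).values.foldl (fun total pairs =>
      let events := PySem.List.sorted2
        (pairs.map (fun p => (p.1, (0 : Int))) ++ pairs.map (fun p => (p.2, (1 : Int))))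
        (·.1) (·.2)
      (events.foldl (fun (st : Int × Int) e =>
        if e.2 == 1 then (st.1 + 1, st.2) else (st.1, st.2 + st.1)) ((0 : Int), total)).2) 0 := rfl

theorem pv_build_eq (nums : List Int) :
    pvBuild nums = ((pvPL nums).map (fun p => (pvS nums p, p))).foldl
      (fun g x => g.modify x.1 [] (· ++ [x.2])) PySem.Dict.empty := by
  rw [List.foldl_map]
  unfold pvPL
  rw [pv_foldl_flatMap]
  unfold pvBuild
  refine PySem.List.foldl_congr_mem _ _ _ _ ?_
  intro acc j _
  rw [List.foldl_map]
  rfl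

theorem pv_build_getD (nums : List Int) (s : Int) :
    (pvBuild nums).getD s [] = (pvPL nums).filter (fun p => pvS nums p == s) := by
  rw [pv_build_eq, PySem.Dict.getD_foldl_modify_append, List.filter_map]
  rw [show ((fun p : Int × (Int × Int) => p.1 == s) ∘ (fun p => (pvS nums p, p)))
      = (fun p => pvS nums p == s) from rfl]
  rw [List.map_map]
  rw [show ((fun x : Int × (Int × Int) => x.2) ∘ fun p : Int × Int => (pvS nums p, p)) = id from rfl,
    List.map_id]
  simp [PySem.Dict.getD_empty]

theorem pv_build_keys (nums : List Int) :
    (pvBuild nums).keys = PySem.Set.ofList ((pvPL nums).map (pvS nums)) := by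
  rw [pv_build_eq]
  rw [PySem.Dict.keys_foldl_modify_key (l := (pvPL nums).map (fun p => (pvS nums p, p)))
    (key := fun x => x.1) (d0 := ([] : List (Int × Int)))
    (f := fun _ x => (· ++ [x.2])) (d := PySem.Dict.empty)]
  rw [List.map_map]
  rw [show (PySem.Dict.empty : PySem.Dict Int (List (Int × Int))).keys = [] from rfl]
  rw [PySem.Set.update_nil_left]
  rfl

theorem pv_build_nodup (nums : List Int) : (pvBuild nums).keys.Nodup := by
  rw [pv_build_keys]
  exact PySem.Set.nodup_ofList _

theorem pv_group_count (g : List (Int × Int)) (total : Int) :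
    ((PySem.List.sorted2 (g.map (fun p => (p.1, (0 : Int))) ++ g.map (fun p => (p.2, (1 : Int))))
        (·.1) (·.2)).foldl
      (fun (st : Int × Int) e =>
        if e.2 == 1 then (st.1 + 1, st.2) else (st.1, st.2 + st.1)) ((0 : Int), total)).2
    = total + pvCg g := by
  set evs := g.map (fun p => (p.1, (0 : Int))) ++ g.map (fun p => (p.2, (1 : Int))) with hevs
  have hperm : (PySem.List.sorted2 evs (·.1) (·.2)).Perm evs := PySem.List.sorted2_perm evs _ _ false
  have hpw := pv_sorted2_pairwise evs
  have htags : ∀ e ∈ PySem.List.sorted2 evs (·.1) (·.2), e.2 = 0 ∨ e.2 = 1 := by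
    intro e he
    have he' : e ∈ evs := hperm.mem_iff.mp he
    rcases List.mem_append.mp he' with h | h <;> rcases List.mem_map.mp h with ⟨p, _, rfl⟩
    · left; rfl
    · right; rfl
  rw [pv_sweep _ hpw htags 0 total]
  have hcnt : ∀ u : Int,
      (PySem.List.sorted2 evs (·.1) (·.2)).countP (fun e' => e'.2 == 1 && decide (e'.1 < u))
        = g.countP (fun p => decide (p.2 < u)) := by
    intro u
    rw [hperm.countP_eq, hevs, List.countP_append, List.countP_map, List.countP_map]
    simp [Function.comp_def]
  have hfil : ((PySem.List.sorted2 evs (·.1) (·.2)).filter (fun e => !(e.2 == 1))).Perm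
      (g.map (fun p => (p.1, (0 : Int)))) := by
    have h1 := hperm.filter (fun e => !(e.2 == 1))
    have h2 : evs.filter (fun e => !(e.2 == 1)) = g.map (fun p => (p.1, (0 : Int))) := by
      rw [hevs, List.filter_append, List.filter_map, List.filter_map]
      simp [Function.comp_def]
    rw [h2] at h1
    exact h1
  have hpt : ∀ e ∈ (PySem.List.sorted2 evs (·.1) (·.2)).filter (fun e => !(e.2 == 1)),
      (0 : Int) + ((PySem.List.sorted2 evs (·.1) (·.2)).countP
          (fun e' => e'.2 == 1 && decide (e'.1 < e.1)) : Int)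
        = (fun e : Int × Int => (g.countP (fun p => decide (p.2 < e.1)) : Int)) e := by
    intro e _
    rw [hcnt e.1]
    ring
  rw [List.map_congr_left hpt,
    (hfil.map (fun e : Int × Int => (g.countP (fun p => decide (p.2 < e.1)) : Int))).sum_eq,
    List.map_map]
  rfl

theorem pv_B_eq (nums : List Int) :
    solve_alt nums = ((pvBuild nums).keys.map
      (fun s => pvCg ((pvPL nums).filter (fun p => pvS nums p == s)))).sum := by
  rw [pv_alt_eq]
  rw [PySem.Dict.values_eq_map_keys _ (pv_build_nodup nums) ([] : List (Int × Int))]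
  rw [List.foldl_map]
  rw [PySem.List.foldl_congr_mem _ _
    (fun (total : Int) k => total + pvCg ((pvPL nums).filter (fun p => pvS nums p == k))) _
    (by
      intro total k _
      rw [pv_build_getD nums k]
      exact pv_group_count _ total)]
  rw [PySem.List.foldl_add _ (fun k => pvCg ((pvPL nums).filter (fun p => pvS nums p == k))) 0]
  rw [zero_add]

theorem pv_B_spec (nums : List Int) : solve_alt nums = pvSpec nums := by
  rw [pv_B_eq, pv_build_keys]
  have hterm : ∀ s ∈ PySem.Set.ofList ((pvPL nums).map (pvS nums)),
      pvCg ((pvPL nums).filter (fun p => pvS nums p == s))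
        = (((pvPL nums).filter (fun x => decide (pvS nums x = s))).map (pvH' nums)).sum := by
    intro s _
    unfold pvCg
    rw [List.filter_congr (fun p _ => show (pvS nums p == s) = decide (pvS nums p = s) by
      by_cases h : pvS nums p = s <;> simp [h])]
    refine congrArg List.sum (List.map_congr_left ?_)
    intro q hq
    have hqs : pvS nums q = s := by
      have := List.of_mem_filter hq
      simpa using this
    rw [List.countP_filter]
    unfold pvH'
    congr 1
    apply List.countP_congr
    intro p _
    unfold pvM
    simp only [Bool.and_eq_true, decide_eq_true_eq]
    constructor
    · rintro ⟨h1, h2⟩; exact ⟨by rw [hqs, h2], h1⟩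
    · rintro ⟨h1, h2⟩; exact ⟨h2, by rw [← hqs, h1]⟩
  rw [List.map_congr_left hterm]
  rw [pv_sum_fibers (pvPL nums) (pvS nums) (pvH' nums) _ (PySem.Set.nodup_ofList _)]
  rw [List.filter_congr (fun q hq => show decide (pvS nums q ∈ PySem.Set.ofList ((pvPL nums).map (pvS nums))) = true by
    simp only [decide_eq_true_eq]
    exact (PySem.Set.mem_ofList _ _).mpr (List.mem_map_of_mem hq))]
  rw [List.filter_true]
  -- the swap: Σ_q #matching p  =  Σ_p #matching q
  unfold pvSpec
  have hB : ((pvPL nums).map (pvH' nums)).sum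
      = ((pvPL nums).map (fun q => ((pvPL nums).map
          (fun p => if pvM nums p q then (1 : Int) else 0)).sum)).sum := by
    refine congrArg List.sum (List.map_congr_left ?_)
    intro q _
    unfold pvH'
    rw [PySem.List.sum_map_ite_one_zero (fun p => pvM nums p q) (pvPL nums)]
  have hA : ((pvPL nums).map (pvH nums)).sum
      = ((pvPL nums).map (fun p => ((pvPL nums).map
          (fun q => if pvM nums p q then (1 : Int) else 0)).sum)).sum := by
    refine congrArg List.sum (List.map_congr_left ?_)
    intro p _
    unfold pvH
    rw [PySem.List.sum_map_ite_one_zero (pvM nums p) (pvPL nums)]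
  rw [hB, hA, pv_sum_sum_swap (pvPL nums) (pvPL nums)
    (fun q p => if pvM nums p q then (1 : Int) else 0)]


-- ===== VERDICT (by name: the statement is the Claim_ definition above) =====
theorem solve_spec : Claim_equal_solve := by
  intro nums _
  unfold Spec_solve
  rw [pv_A_spec, pv_B_spec]
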